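-- pv_equiv track=rewrite | github.com/THEBLESSMAN867/F.A.R.F.A.N-MECHANISTIC_POLICY_PIPELINE | src/farfan_pipeline/api/dashboard_data_service.py | _parse_question_identifier
-- ===== SOURCE A (Python) =====
-- def _parse_question_identifier(identifier: str) -> tuple[str | None, str | None]:
--     cleaned = identifier.replace('_', '-').upper()
--     parts = cleaned.split('-')
--     policy_area = None
--     dimension = None
--     for part in parts:
--         if part.startswith('PA') and part[2:].isdigit():
--             policy_area = part
--         elif part.startswith('DIM') and part[3:].isdigit():
--             dimension = part
--         elif part.startswith('D') and part[1:].isdigit() and not dimension: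
--             dimension = f'DIM{part[1:]}'
--     return policy_area, dimension
-- ===== SOURCE B (Python) =====
-- def _parse_question_identifier(identifier):
--     parts = identifier.replace('_', '-').upper().split('-')
--     pa = [p for p in parts if p.startswith('PA') and p[2:].isdigit()]
--     dim = [p for p in parts if p.startswith('DIM') and p[3:].isdigit()]
--     dd = [p for p in parts if p.startswith('D')
--           and not (p.startswith('DIM') and p[3:].isdigit())
--           and p[1:].isdigit()]
--     policy_area = pa[-1] if pa else None
--     if dim:
--         dimension = dim[-1]
--     elif dd:
--         dimension = 'DIM' + dd[0][1:]
--     else: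
--         dimension = None
--     return policy_area, dimension
-- ===== Notes on version B (the rewrite author's own statement) =====
-- stated objective: alternative
-- what changed: Replaced A's single stateful last-wins loop over the tokens with a classify-then-select decomposition: filter the PA, DIM and plain-D candidate tokens into three lists, then pick the last PA, and the last DIM else the first plain-D (normalised to DIM form).
import Mathlib
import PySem

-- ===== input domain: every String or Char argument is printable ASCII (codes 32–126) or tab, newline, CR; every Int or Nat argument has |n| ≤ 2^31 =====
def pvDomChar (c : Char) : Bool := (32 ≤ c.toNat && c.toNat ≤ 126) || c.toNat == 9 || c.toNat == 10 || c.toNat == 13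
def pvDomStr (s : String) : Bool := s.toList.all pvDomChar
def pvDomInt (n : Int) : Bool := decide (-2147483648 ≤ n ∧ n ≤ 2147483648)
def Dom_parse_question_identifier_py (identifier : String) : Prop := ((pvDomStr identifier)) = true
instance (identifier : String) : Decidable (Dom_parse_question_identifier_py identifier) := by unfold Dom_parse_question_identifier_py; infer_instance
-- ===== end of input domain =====

-- B replaces A's single stateful last-wins loop with a classify-then-select decomposition
-- (filter the PA / DIM / plain-D candidate tokens, then pick last PA, last DIM else first D);
-- objective: alternative decomposition, same cost.

-- ===== PORT A =====
-- A-side helper: the body of A's for-loop, named so the proof can speak about it.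
def pvStepA (acc : Option String × Option String) (part : String) : Option String × Option String :=
  if PySem.Str.startswith part "PA" && PySem.Str.strIsdigit (PySem.Str.slice part (some 2) none) then
    (some part, acc.2)
  else if PySem.Str.startswith part "DIM" && PySem.Str.strIsdigit (PySem.Str.slice part (some 3) none) then
    (acc.1, some part)
  else if PySem.Str.startswith part "D" && PySem.Str.strIsdigit (PySem.Str.slice part (some 1) none) && acc.2 == none then
    (acc.1, some ("DIM" ++ PySem.Str.slice part (some 1) none))
  else
    acc

def parse_question_identifier_py (identifier : String) : Option String × Option String :=
  let cleaned := PySem.Str.upper (PySem.Str.replace identifier "_" "-")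
  let parts := (PySem.Str.split? cleaned "-").getD []
  parts.foldl pvStepA (none, none)

-- ===== PORT B =====
-- B-side helpers: the three token classes and the DIM-normaliser from Source B.
def pvIsPA (p : String) : Bool :=
  PySem.Str.startswith p "PA" && PySem.Str.strIsdigit (PySem.Str.slice p (some 2) none)
def pvIsDIM (p : String) : Bool :=
  PySem.Str.startswith p "DIM" && PySem.Str.strIsdigit (PySem.Str.slice p (some 3) none)
def pvIsD (p : String) : Bool :=
  PySem.Str.startswith p "D" && !pvIsDIM p && PySem.Str.strIsdigit (PySem.Str.slice p (some 1) none)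
def pvMkDIM (p : String) : String := "DIM" ++ PySem.Str.slice p (some 1) none

def parse_question_identifier_py_alt (identifier : String) : Option String × Option String :=
  let parts := (PySem.Str.split? (PySem.Str.upper (PySem.Str.replace identifier "_" "-")) "-").getD []
  let pa := parts.filter pvIsPA
  let dim := parts.filter pvIsDIM
  let dd := parts.filter pvIsD
  (pa.getLast?, (dim.getLast?).or (dd.head?.map pvMkDIM))

-- ===== PRECONDITION & SPEC =====
def Spec_parse_question_identifier_py (identifier : String) (out : Option String × Option String) : Prop := out = parse_question_identifier_py_alt identifier
instance (identifier : String) (out : Option String × Option String) : Decidable (Spec_parse_question_identifier_py identifier out) := by unfold Spec_parse_question_identifier_py; infer_instance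

-- ===== CLAIM (what is proved, stated in full; the proofs are below) =====
def Claim_equal_parse_question_identifier_py : Prop := ∀ (identifier : String), Dom_parse_question_identifier_py identifier → Spec_parse_question_identifier_py identifier (parse_question_identifier_py identifier)

-- ===== LEMMAS AND PROOFS =====

-- appending a later candidate in front: last-wins as Option.or
lemma pv_getLast?_cons_or {α : Type} (a : α) (l : List α) (x : Option α) :
    (a :: l).getLast?.or x = l.getLast?.or (some a) := by
  induction l generalizing a x with
  | nil => simp
  | cons b l' ih => rw [List.getLast?_cons_cons, ih, ih]

-- a prefix determines the first character
lemma pv_head_of_startswith (p q : String) (c : Char)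
    (hs : PySem.Str.startswith p q = true) (hq : q.toList.head? = some c) :
    p.toList.head? = some c := by
  have h := (PySem.Chars.startswith_iff _ _).mp (by simpa using hs)
  rcases h with ⟨t, ht⟩
  rw [← ht]
  cases hql : q.toList with
  | nil => simp [hql] at hq
  | cons a l => rw [hql] at hq; simp at hq ⊢; exact hq

-- A's step, phrased through B's classifiers (definitional)
lemma pvStepA_eq (acc : Option String × Option String) (p : String) :
    pvStepA acc p =
      if pvIsPA p then (some p, acc.2)
      else if pvIsDIM p then (acc.1, some p)
      else if PySem.Str.startswith p "D" && PySem.Str.strIsdigit (PySem.Str.slice p (some 1) none) && acc.2 == none then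
        (acc.1, some (pvMkDIM p))
      else acc := rfl

-- The loop invariant: A's fold from any state equals B's classify-then-select,
-- with the initial state as fallback.
lemma pvLoop (parts : List String) (pa0 d0 : Option String) :
    parts.foldl pvStepA (pa0, d0) =
    ((parts.filter pvIsPA).getLast?.or pa0,
     ((parts.filter pvIsDIM).getLast?).or (d0.or (((parts.filter pvIsD).head?).map pvMkDIM))) := by
  induction parts generalizing pa0 d0 with
  | nil => simp
  | cons p rest ih =>
      simp only [List.foldl_cons, List.filter_cons, pvStepA_eq]
      by_cases h1 : pvIsPA p = true
      · -- PA token: first character is 'P', so it is neither a DIM nor a plain-D token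
        have hp : p.toList.head? = some 'P' :=
          pv_head_of_startswith p "PA" 'P' (by simp [pvIsPA] at h1; exact h1.1) (by decide)
        have h2 : pvIsDIM p = false := by
          cases hd : pvIsDIM p with
          | false => rfl
          | true =>
              have := pv_head_of_startswith p "DIM" 'D' (by simp [pvIsDIM] at hd; exact hd.1) (by decide)
              rw [hp] at this; simp at this
        have hsD : PySem.Str.startswith p "D" = false := by
          cases hd : PySem.Str.startswith p "D" with
          | false => rfl
          | true =>
              have := pv_head_of_startswith p "D" 'D' hd (by decide)
              rw [hp] at this; simp at this
        have h3 : pvIsD p = false := by unfold pvIsD; rw [hsD]; simp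
        simp [h1, h2, h3, ih, pv_getLast?_cons_or]
      · have h1' : pvIsPA p = false := by simpa using h1
        by_cases h2 : pvIsDIM p = true
        · have h3 : pvIsD p = false := by
            unfold pvIsD; rw [show pvIsDIM p = true from h2]; simp
          simp [h1', h2, h3, ih, pv_getLast?_cons_or]
        · have h2' : pvIsDIM p = false := by simpa using h2
          cases hsD : PySem.Str.startswith p "D" with
          | false =>
              have h3 : pvIsD p = false := by unfold pvIsD; rw [hsD]; simp
              simp [h1', h2', h3, ih]
          | true =>
              cases hdig : PySem.Str.strIsdigit (PySem.Str.slice p (some 1) none) with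
              | false =>
                  have h3 : pvIsD p = false := by unfold pvIsD; rw [hdig]; simp
                  simp [h1', h2', h3, ih]
              | true =>
                  have h3 : pvIsD p = true := by unfold pvIsD; rw [hsD, h2', hdig]; rfl
                  cases d0 with
                  | none => simp [h1', h2', h3, ih, pvMkDIM]
                  | some v => simp [h1', h2', h3, ih]

-- ===== VERDICT (by name: the statement is the Claim_ definition above) =====
theorem parse_question_identifier_py_spec : Claim_equal_parse_question_identifier_py := by
  intro identifier _
  unfold Spec_parse_question_identifier_py parse_question_identifier_py parse_question_identifier_py_alt
  rw [pvLoop]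
  simp
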